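-- pv_equiv track=rewrite | github.com/StarSein/BaekJoon | 백준/Gold/20010. 악덕 영주 혜유/악덕 영주 혜유.py | solution
-- ===== SOURCE A (Python) =====
-- from typing import List, Tuple
--
-- def solution(N: int, K: int, edges: List[Tuple[int, int, int]]) -> Tuple[int, int]:
--     def find_root(node: int) -> int:
--         if roots[node] != node:
--             roots[node] = find_root(roots[node])
--         return roots[node]
--
--     def union(a: int, b: int):
--         if a > b:
--             a, b = b, a
--         roots[b] = a
--
--     edges.sort(key=lambda x: x[2])
--     roots = [node for node in range(N)]
--     MST_edges = []
--     answer1 = 0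
--     for a, b, c in edges:
--         ra = find_root(a)
--         rb = find_root(b)
--         if ra != rb:
--             union(ra, rb)
--             MST_edges.append((a, b, c))
--             answer1 += c
--
--     graph = [[] for _ in range(N)]
--     for a, b, c in MST_edges:
--         graph[a].append((b, c))
--         graph[b].append((a, c))
--
--     def dfs(cur: int, par: int) -> Tuple[int, int]:
--         cur_node, cur_dist = cur, 0
--         for nex, weight in graph[cur]:
--             if nex != par:
--                 nex_node, nex_dist = dfs(nex, cur)
--                 if weight + nex_dist > cur_dist:
--                     cur_dist = weight + nex_dist
--                     cur_node = nex_node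
--         return cur_node, cur_dist
--
--     x, _ = dfs(0, -1)
--     y, answer2 = dfs(x, -1)
--     return answer1, answer2
-- ===== SOURCE B (Python) =====
-- from typing import List, Tuple
--
-- def solution(N: int, K: int, edges: List[Tuple[int, int, int]]) -> Tuple[int, int]:
--     # B: component-label union (O(N) relabel per union) instead of a path-compressing
--     # union-find tree, adjacency built during the Kruskal pass, and the diameter taken
--     # by collecting a flat preorder (node, distance) list and scanning it for the first
--     # strict maximum, instead of propagating a best pair up a recursive DFS.
--     # Note: like A, this sorts `edges` in place.
--     edges.sort(key=lambda x: x[2])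
--     comp = list(range(N))
--     adj = [[] for _ in range(N)]
--     answer1 = 0
--     for a, b, c in edges:
--         ra, rb = comp[a], comp[b]
--         if ra != rb:
--             lo, hi = (ra, rb) if ra < rb else (rb, ra)
--             comp = [lo if x == hi else x for x in comp]
--             adj[a].append((b, c))
--             adj[b].append((a, c))
--             answer1 += c
--
--     def walk(cur: int, par: int, d: int) -> List[Tuple[int, int]]:
--         out = [(cur, d)]
--         for nex, w in adj[cur]:
--             if nex != par:
--                 out.extend(walk(nex, cur, d + w))
--         return out
--
--     def best(items):
--         bn, bd = items[0]
--         for n, d in items[1:]: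
--             if d > bd:
--                 bn, bd = n, d
--         return bn, bd
--
--     x, _ = best(walk(0, -1, 0))
--     _, answer2 = best(walk(x, -1, 0))
--     return answer1, answer2
-- ===== Notes on version B (the rewrite author's own statement) =====
-- stated objective: alternative
-- what changed: B replaces A's path-compressing recursive union-find by a flat component-label array relabelled in O(N) per union (built together with the adjacency lists in the Kruskal pass), and replaces A's recursive DFS that propagates a best (node,dist) pair upward by a walk that returns the flat preorder list of (node, distance) pairs which is then scanned once for its first strict maximum.
-- outside the precondition, e.g. on solution(2, 1, [(0, -1, 3)]): A returns (3, 0), B returns (3, 0)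
import Mathlib
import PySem

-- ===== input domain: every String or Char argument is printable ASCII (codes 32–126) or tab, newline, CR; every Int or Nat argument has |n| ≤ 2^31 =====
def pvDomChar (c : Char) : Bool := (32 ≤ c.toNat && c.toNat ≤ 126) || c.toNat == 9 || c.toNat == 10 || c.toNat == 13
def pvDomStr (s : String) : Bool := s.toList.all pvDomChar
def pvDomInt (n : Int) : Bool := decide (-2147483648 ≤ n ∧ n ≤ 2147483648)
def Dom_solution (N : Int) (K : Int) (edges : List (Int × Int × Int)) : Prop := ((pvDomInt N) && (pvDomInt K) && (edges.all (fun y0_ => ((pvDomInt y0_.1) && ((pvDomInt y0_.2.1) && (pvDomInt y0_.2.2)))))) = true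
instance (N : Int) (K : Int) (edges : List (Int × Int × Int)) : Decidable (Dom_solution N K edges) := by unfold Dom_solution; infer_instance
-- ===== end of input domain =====

-- B replaces A's path-compressing union-find by an O(N) component-label relabel per union and
-- A's best-pair-propagating recursive DFS by a flat preorder (node, distance) list that is
-- scanned for its first strict maximum (objective: alternative; like A, B sorts `edges` in place).

-- ===== PORT A =====
-- find_root with path compression; fuel totalizes Python's recursion (on Pre_ inputs the
-- chain of parents strictly decreases, so fuel roots.length + 1 is never exhausted)
def findA (fuel : Nat) (roots : List Int) (node : Int) : List Int × Int :=
  match fuel with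
  | 0 => (roots, node)
  | f+1 =>
    let r := PySem.List.pyGetD roots node 0
    if r ≠ node then
      let p := findA f roots r
      let roots2 := PySem.List.pySetD p.1 node p.2
      (roots2, PySem.List.pyGetD roots2 node 0)
    else (roots, r)

-- one iteration of A's Kruskal loop; state = (roots, MST_edges, answer1)
def stepA (st : List Int × List (Int × Int × Int) × Int) (e : Int × Int × Int) :
    List Int × List (Int × Int × Int) × Int :=
  let p1 := findA (st.1.length + 1) st.1 e.1
  let p2 := findA (p1.1.length + 1) p1.1 e.2.1
  if p1.2 ≠ p2.2 then
    let lo := if p1.2 > p2.2 then p2.2 else p1.2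
    let hi := if p1.2 > p2.2 then p1.2 else p2.2
    (PySem.List.pySetD p2.1 hi lo, st.2.1 ++ [e], st.2.2 + e.2.2)
  else (p2.1, st.2.1, st.2.2)

-- graph[a].append((b, c)); graph[b].append((a, c))
def gStep (g : List (List (Int × Int))) (e : Int × Int × Int) : List (List (Int × Int)) :=
  let g1 := PySem.List.pySetD g e.1 (PySem.List.pyGetD g e.1 [] ++ [(e.2.1, e.2.2)])
  PySem.List.pySetD g1 e.2.1 (PySem.List.pyGetD g1 e.2.1 [] ++ [(e.1, e.2.2)])

-- A's dfs; fuel totalizes the recursion (the MST graph is a forest, depth ≤ g.length on Pre_ inputs)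
def dfsA (fuel : Nat) (g : List (List (Int × Int))) (cur par : Int) : Int × Int :=
  match fuel with
  | 0 => (cur, 0)
  | f+1 =>
    (PySem.List.pyGetD g cur []).foldl
      (fun acc p =>
        if p.1 ≠ par then
          let r := dfsA f g p.1 cur
          if p.2 + r.2 > acc.2 then (r.1, p.2 + r.2) else acc
        else acc)
      (cur, 0)

def solution (N : Int) (K : Int) (edges : List (Int × Int × Int)) : Int × Int :=
  let es := PySem.List.sorted edges (fun e => e.2.2) false
  let st := es.foldl stepA (PySem.List.pyRange 0 N 1, [], 0)
  let g := st.2.1.foldl gStep ((PySem.List.pyRange 0 N 1).map (fun _ => []))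
  let x := (dfsA (g.length + 1) g 0 (-1)).1
  (st.2.2, (dfsA (g.length + 1) g x (-1)).2)

-- ===== PORT B =====
-- one iteration of B's loop; state = (comp, adj, answer1)
def stepB (st : List Int × List (List (Int × Int)) × Int) (e : Int × Int × Int) :
    List Int × List (List (Int × Int)) × Int :=
  let ra := PySem.List.pyGetD st.1 e.1 0
  let rb := PySem.List.pyGetD st.1 e.2.1 0
  if ra ≠ rb then
    let lo := if ra < rb then ra else rb
    let hi := if ra < rb then rb else ra
    let g1 := PySem.List.pySetD st.2.1 e.1 (PySem.List.pyGetD st.2.1 e.1 [] ++ [(e.2.1, e.2.2)])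
    let g2 := PySem.List.pySetD g1 e.2.1 (PySem.List.pyGetD g1 e.2.1 [] ++ [(e.1, e.2.2)])
    (st.1.map (fun x => if x = hi then lo else x), g2, st.2.2 + e.2.2)
  else st

-- B's walk: flat preorder list of (node, distance); same fuel totalization as A's dfs
def walkB (fuel : Nat) (g : List (List (Int × Int))) (cur par d : Int) : List (Int × Int) :=
  match fuel with
  | 0 => [(cur, d)]
  | f+1 =>
    (PySem.List.pyGetD g cur []).foldl
      (fun out p => if p.1 ≠ par then out ++ walkB f g p.1 cur (d + p.2) else out)
      [(cur, d)]

-- B's best: first strict maximum of a nonempty list ([] is unreachable from walkB)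
def bestB (items : List (Int × Int)) : Int × Int :=
  match items with
  | [] => (0, 0)
  | h :: t => t.foldl (fun acc p => if p.2 > acc.2 then p else acc) h

def solution_alt (N : Int) (K : Int) (edges : List (Int × Int × Int)) : Int × Int :=
  let es := PySem.List.sorted edges (fun e => e.2.2) false
  let st := es.foldl stepB
    (PySem.List.pyRange 0 N 1, (PySem.List.pyRange 0 N 1).map (fun _ => []), 0)
  let g := st.2.1
  let x := (bestB (walkB (g.length + 1) g 0 (-1) 0)).1
  (st.2.2, (bestB (walkB (g.length + 1) g x (-1) 0)).2)

-- ===== PRECONDITION & SPEC =====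
-- Pre_ needs N ≥ 1 (else dfs(0,-1) hits graph[0] → IndexError) and in-range endpoints (else
-- find_root → IndexError).  It also excludes negative (wrap-around) endpoints, on which the MST
-- adjacency stores a node under two names and A's DFS recursion can cycle forever (RecursionError),
-- with no closed-form line between those inputs and the ones where A still returns (B, traversing
-- identically, returns the same values there).
def Pre_solution (N : Int) (K : Int) (edges : List (Int × Int × Int)) : Prop :=
  1 ≤ N ∧ ∀ e ∈ edges, (0 ≤ e.1 ∧ e.1 < N) ∧ (0 ≤ e.2.1 ∧ e.2.1 < N)
instance (N : Int) (K : Int) (edges : List (Int × Int × Int)) : Decidable (Pre_solution N K edges) := by unfold Pre_solution; infer_instance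
def pvWitness_solution : Int × Int × (List (Int × Int × Int)) := (3, 2, [(0, 1, 5), (1, 2, 4)])

def Spec_solution (N : Int) (K : Int) (edges : List (Int × Int × Int)) (out : Int × Int) : Prop := out = solution_alt N K edges
instance (N : Int) (K : Int) (edges : List (Int × Int × Int)) (out : Int × Int) : Decidable (Spec_solution N K edges out) := by unfold Spec_solution; infer_instance

-- ===== CLAIM (what is proved, stated in full; the proofs are below) =====
def Claim_equal_solution : Prop := ∀ (N : Int) (K : Int) (edges : List (Int × Int × Int)), Dom_solution N K edges → Pre_solution N K edges → Spec_solution N K edges (solution N K edges)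


-- ===== LEMMAS AND PROOFS =====

-- ---- proof-side helpers: the canonical root of the union-find array ----

-- proof-side array access (kept as its own def so simp does not renormalize it)
def gd (l : List Int) (i : Nat) : Int := (l[i]?).getD 0


-- pure chase along the parent array (no compression); fuel-totalized
def chase (fuel : Nat) (roots : List Int) (v : Int) : Int :=
  match fuel with
  | 0 => v
  | f+1 =>
    let r := PySem.List.pyGetD roots v 0
    if r = v then v else chase f roots r

def rootN (roots : List Int) (v : Int) : Int := chase (roots.length + 1) roots v

-- invariant of A's roots array: entries are indices that never increase
def InvR (roots : List Int) : Prop :=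
  ∀ i : Nat, i < roots.length → 0 ≤ gd roots i ∧ gd roots i ≤ (i : Int)

lemma pyGetD_int (roots : List Int) (v : Int) (h0 : 0 ≤ v) :
    PySem.List.pyGetD roots v 0 = gd roots v.toNat := by
  rw [show v = ((v.toNat : Nat) : Int) by omega, PySem.List.pyGetD_natCast]
  have : (max v 0).toNat = v.toNat := by omega
  simp [gd, List.getD_eq_getElem?_getD, this]

lemma gd_set_lt (l : List Int) (j : Nat) (w : Int) (i : Nat) (hi : i < l.length) :
    gd (l.set j w) i = if i = j then w else gd l i := by
  simp only [gd, List.getElem?_set]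
  by_cases h : j = i
  · subst h; simp [hi]
  · have h2 : ¬ i = j := fun hh => h hh.symm
    simp [h, h2]

lemma gd_map_lt (l : List Int) (f : Int → Int) (i : Nat) (hi : i < l.length) :
    gd (l.map f) i = f (gd l i) := by
  simp only [gd, List.getElem?_map, List.getElem?_eq_getElem hi]
  simp

lemma chase_master (roots : List Int) (hInv : InvR roots) :
    ∀ k : Nat, ∀ v : Int, 0 ≤ v → v < (roots.length : Int) → v.toNat ≤ k →
    ∀ fuel : Nat, k < fuel →
      chase fuel roots v = rootN roots v ∧
      0 ≤ chase fuel roots v ∧ chase fuel roots v ≤ v ∧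
      gd roots (chase fuel roots v).toNat = chase fuel roots v := by
  intro k
  induction k using Nat.strong_induction_on with
  | _ k IH =>
    intro v h0 h1 hk fuel hf
    obtain ⟨f, rfl⟩ : ∃ f, fuel = f + 1 := ⟨fuel - 1, by omega⟩
    have hv := pyGetD_int roots v h0
    by_cases hc : gd roots v.toNat = v
    · have e1 : chase (f + 1) roots v = v := by
        simp only [chase, hv]; rw [if_pos hc]
      have e2 : rootN roots v = v := by
        simp only [rootN, chase, hv]; rw [if_pos hc]
      refine ⟨by rw [e1, e2], by rw [e1]; exact h0, by rw [e1], by rw [e1]; exact hc⟩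
    · have hr0 : 0 ≤ gd roots v.toNat := (hInv v.toNat (by omega)).1
      have hr1 : gd roots v.toNat ≤ (v.toNat : Int) := (hInv v.toNat (by omega)).2
      have hrlt : gd roots v.toNat < v := by omega
      have e1 : chase (f + 1) roots v = chase f roots (gd roots v.toNat) := by
        simp only [chase, hv]; rw [if_neg hc]
      have e2 : rootN roots v = chase roots.length roots (gd roots v.toNat) := by
        simp only [rootN, chase, hv]; rw [if_neg hc]
      have h1' : gd roots v.toNat < (roots.length : Int) := by omega
      have hIH1 := IH (gd roots v.toNat).toNat (by omega) (gd roots v.toNat)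
        hr0 h1' le_rfl f (by omega)
      have hIH2 := IH (gd roots v.toNat).toNat (by omega) (gd roots v.toNat)
        hr0 h1' le_rfl roots.length (by omega)
      refine ⟨by rw [e1, e2, hIH1.1, hIH2.1], by rw [e1]; exact hIH1.2.1,
        by rw [e1]; exact le_trans hIH1.2.2.1 (le_of_lt hrlt), by rw [e1]; exact hIH1.2.2.2⟩

lemma rootN_stable (roots : List Int) (hInv : InvR roots) (v : Int) (h0 : 0 ≤ v)
    (h1 : v < (roots.length : Int)) (fuel : Nat) (hf : v.toNat < fuel) :
    chase fuel roots v = rootN roots v :=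
  (chase_master roots hInv v.toNat v h0 h1 le_rfl fuel hf).1

lemma rootN_props (roots : List Int) (hInv : InvR roots) (v : Int) (h0 : 0 ≤ v)
    (h1 : v < (roots.length : Int)) :
    0 ≤ rootN roots v ∧ rootN roots v ≤ v ∧
      gd roots (rootN roots v).toNat = rootN roots v := by
  have h := chase_master roots hInv v.toNat v h0 h1 le_rfl (roots.length + 1)
    (by omega)
  exact ⟨h.1 ▸ h.2.1, h.1 ▸ h.2.2.1, h.1 ▸ h.2.2.2⟩

lemma root_step (roots : List Int) (hInv : InvR roots) (v : Int) (h0 : 0 ≤ v)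
    (h1 : v < (roots.length : Int)) :
    rootN roots v = if gd roots v.toNat = v then v
      else rootN roots (gd roots v.toNat) := by
  have hv : PySem.List.pyGetD roots v 0 = gd roots v.toNat := pyGetD_int roots v h0
  by_cases hc : gd roots v.toNat = v
  · simp only [chase, rootN, hv, hc, if_pos]
  · have hr0 : 0 ≤ gd roots v.toNat := (hInv v.toNat (by omega)).1
    have hr1 : gd roots v.toNat ≤ (v.toNat : Int) := (hInv v.toNat (by omega)).2
    have hstep : rootN roots v = chase roots.length roots (gd roots v.toNat) := by
      simp only [rootN, chase, hv]
      rw [if_neg hc]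
    rw [hstep, rootN_stable roots hInv _ hr0 (by omega) roots.length (by omega), if_neg hc]

lemma rootN_of_fix (roots : List Int) (v : Int)
    (h0 : 0 ≤ v) (hfix : gd roots v.toNat = v) : rootN roots v = v := by
  simp only [rootN, chase, pyGetD_int roots v h0, hfix, if_pos]

lemma fix_of_rootN (roots : List Int) (hInv : InvR roots) (v : Int) (h0 : 0 ≤ v)
    (h1 : v < (roots.length : Int)) (h : rootN roots v = v) :
    gd roots v.toNat = v := by
  by_contra hne
  rw [root_step roots hInv v h0 h1, if_neg hne] at h
  have hr0 : 0 ≤ gd roots v.toNat := (hInv v.toNat (by omega)).1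
  have hr1 : gd roots v.toNat ≤ (v.toNat : Int) := (hInv v.toNat (by omega)).2
  have hrlt : gd roots v.toNat < v := by omega
  have := (rootN_props roots hInv _ hr0 (by omega)).2.1
  omega

lemma rootN_idem (roots : List Int) (hInv : InvR roots) (v : Int) (h0 : 0 ≤ v)
    (h1 : v < (roots.length : Int)) : rootN roots (rootN roots v) = rootN roots v := by
  obtain ⟨ha, hb, hc⟩ := rootN_props roots hInv v h0 h1
  exact rootN_of_fix roots _ ha hc

-- path compression: writing the root of `node` into slot `node` changes no root
lemma rootN_compress (roots : List Int) (hInv : InvR roots) (node : Nat)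
    (hn : node < roots.length) :
    InvR (roots.set node (rootN roots (node : Int))) ∧
    ∀ v : Nat, v < roots.length →
      rootN (roots.set node (rootN roots (node : Int))) (v : Int) = rootN roots (v : Int) := by
  obtain ⟨hr0, hrle, hrfix⟩ := rootN_props roots hInv (node : Int)
    (Int.natCast_nonneg node) (by exact_mod_cast hn)
  set r := rootN roots (node : Int) with hrdef
  have hInv' : InvR (roots.set node r) := by
    intro i hi
    rw [List.length_set] at hi
    rw [gd_set_lt _ _ _ _ hi]
    by_cases h : i = node
    · rw [if_pos h]; subst h; exact ⟨hr0, hrle⟩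
    · rw [if_neg h]; exact hInv i hi
  refine ⟨hInv', ?_⟩
  intro v
  induction v using Nat.strong_induction_on with
  | _ v IH =>
    intro hv
    have hlen : (roots.set node r).length = roots.length := by simp
    have hgd' : gd (roots.set node r) v = if v = node then r else gd roots v :=
      gd_set_lt roots node r v hv
    by_cases hvn : v = node
    · subst hvn
      rw [if_pos rfl] at hgd'
      by_cases hre : r = (v : Int)
      · have e1 : rootN (roots.set v r) (v : Int) = (v : Int) :=
          rootN_of_fix _ _ (Int.natCast_nonneg v) (by simpa [hre] using hgd')
        rw [e1, ← hrdef, hre]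
      · have e1 : rootN (roots.set v r) (v : Int) = rootN (roots.set v r) r := by
          rw [root_step _ hInv' (v : Int) (Int.natCast_nonneg v)
            (by rw [hlen]; exact_mod_cast hv)]
          simp only [Int.toNat_natCast, hgd']
          rw [if_neg hre]
        have hrtn : r.toNat < v := by omega
        have e2 : rootN (roots.set v r) r = rootN roots r := by
          have := IH r.toNat hrtn (by omega)
          rwa [show ((r.toNat : Nat) : Int) = r by omega] at this
        have e3 : rootN roots r = r := rootN_of_fix roots r hr0 hrfix
        rw [e1, e2, e3]
    · rw [if_neg hvn] at hgd'
      have hv' : v < roots.length := hv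
      have hb := hInv v hv'
      by_cases hfx : gd roots v = (v : Int)
      · rw [rootN_of_fix _ _ (Int.natCast_nonneg v) (by simpa using (hgd'.trans hfx)),
          rootN_of_fix _ _ (Int.natCast_nonneg v) (by simpa using hfx)]
      · have e1 : rootN (roots.set node r) (v : Int) =
            rootN (roots.set node r) (gd roots v) := by
          rw [root_step _ hInv' (v : Int) (Int.natCast_nonneg v)
            (by rw [hlen]; exact_mod_cast hv)]
          simp only [Int.toNat_natCast, hgd']
          rw [if_neg hfx]
        have e2 : rootN roots (v : Int) = rootN roots (gd roots v) := by
          rw [root_step _ hInv (v : Int) (Int.natCast_nonneg v) (by exact_mod_cast hv)]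
          simp only [Int.toNat_natCast]
          rw [if_neg hfx]
        obtain ⟨hb1, hb2⟩ := hb
        have hgtn : (gd roots v).toNat < v := by omega
        have e3 := IH (gd roots v).toNat hgtn (by omega)
        rw [show (((gd roots v).toNat : Nat) : Int) = gd roots v by omega] at e3
        rw [e1, e2, e3]

-- union: writing root `lo` into root slot `hi` redirects exactly the `hi`-class
lemma rootN_union (roots : List Int) (hInv : InvR roots) (lo hi : Int)
    (hlo0 : 0 ≤ lo) (hlohi : lo < hi) (hhi : hi < (roots.length : Int))
    (hfl : gd roots lo.toNat = lo) (hfh : gd roots hi.toNat = hi) :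
    InvR (roots.set hi.toNat lo) ∧
    ∀ v : Nat, v < roots.length →
      rootN (roots.set hi.toNat lo) (v : Int) =
        if rootN roots (v : Int) = hi then lo else rootN roots (v : Int) := by
  have hhi0 : 0 ≤ hi := by omega
  have hInv' : InvR (roots.set hi.toNat lo) := by
    intro i hi'
    rw [List.length_set] at hi'
    rw [gd_set_lt _ _ _ _ hi']
    by_cases h : i = hi.toNat
    · rw [if_pos h]; subst h; constructor
      · exact hlo0
      · omega
    · rw [if_neg h]; exact hInv i hi'
  refine ⟨hInv', ?_⟩
  intro v
  induction v using Nat.strong_induction_on with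
  | _ v IH =>
    intro hv
    have hlen : (roots.set hi.toNat lo).length = roots.length := by simp
    have hgd' : gd (roots.set hi.toNat lo) v = if v = hi.toNat then lo else gd roots v :=
      gd_set_lt roots hi.toNat lo v hv
    by_cases hvh : v = hi.toNat
    · subst hvh
      rw [if_pos rfl] at hgd'
      have hcast : ((hi.toNat : Nat) : Int) = hi := by omega
      have e1 : rootN (roots.set hi.toNat lo) ((hi.toNat : Nat) : Int) =
          rootN (roots.set hi.toNat lo) lo := by
        rw [root_step _ hInv' _ (Int.natCast_nonneg _) (by rw [hlen]; exact_mod_cast hv)]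
        simp only [Int.toNat_natCast, hgd']
        rw [if_neg (by omega)]
      have e2 : rootN (roots.set hi.toNat lo) lo = rootN roots lo := by
        have := IH lo.toNat (by omega) (by omega)
        have hif : rootN roots ((lo.toNat : Nat) : Int) = lo := by
          rw [show ((lo.toNat : Nat) : Int) = lo by omega]
          exact rootN_of_fix roots lo hlo0 hfl
        rw [hif, if_neg (by omega), show ((lo.toNat : Nat) : Int) = lo by omega] at this
        rw [this]
        rw [show ((lo.toNat : Nat) : Int) = lo by omega] at hif
        exact hif.symm ▸ rfl
      have e3 : rootN roots lo = lo := rootN_of_fix roots lo hlo0 hfl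
      have e4 : rootN roots ((hi.toNat : Nat) : Int) = hi := by
        rw [hcast]; exact rootN_of_fix roots hi hhi0 hfh
      rw [e1, e2, e3, e4, if_pos rfl]
    · rw [if_neg hvh] at hgd'
      obtain ⟨hb1, hb2⟩ := hInv v hv
      by_cases hfx : gd roots v = (v : Int)
      · have eL : rootN (roots.set hi.toNat lo) (v : Int) = (v : Int) :=
          rootN_of_fix _ _ (Int.natCast_nonneg v) (by simpa using (hgd'.trans hfx))
        have eR : rootN roots (v : Int) = (v : Int) :=
          rootN_of_fix _ _ (Int.natCast_nonneg v) (by simpa using hfx)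
        rw [eL, eR, if_neg (by omega)]
      · have e1 : rootN (roots.set hi.toNat lo) (v : Int) =
            rootN (roots.set hi.toNat lo) (gd roots v) := by
          rw [root_step _ hInv' (v : Int) (Int.natCast_nonneg v)
            (by rw [hlen]; exact_mod_cast hv)]
          simp only [Int.toNat_natCast, hgd']
          rw [if_neg hfx]
        have e2 : rootN roots (v : Int) = rootN roots (gd roots v) := by
          rw [root_step _ hInv (v : Int) (Int.natCast_nonneg v) (by exact_mod_cast hv)]
          simp only [Int.toNat_natCast]
          rw [if_neg hfx]
        have e3 := IH (gd roots v).toNat (by omega) (by omega)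
        rw [show (((gd roots v).toNat : Nat) : Int) = gd roots v by omega] at e3
        rw [e1, e2, e3]

lemma findA_spec (roots : List Int) (hInv : InvR roots) :
    ∀ fuel : Nat, ∀ v : Int, 0 ≤ v → v < (roots.length : Int) → v.toNat < fuel →
      (findA fuel roots v).2 = rootN roots v ∧
      (findA fuel roots v).1.length = roots.length ∧
      InvR (findA fuel roots v).1 ∧
      (∀ u : Nat, u < roots.length →
        rootN (findA fuel roots v).1 (u : Int) = rootN roots (u : Int)) := by
  intro fuel
  induction fuel with
  | zero => intro v _ _ hf; omega
  | succ f IHf =>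
    intro v h0 h1 hf
    have hv := pyGetD_int roots v h0
    by_cases hc : gd roots v.toNat = v
    · have e : findA (f + 1) roots v = (roots, gd roots v.toNat) := by
        simp only [findA, hv]
        rw [if_neg (not_ne_iff.mpr hc)]
      rw [e]
      exact ⟨(rootN_of_fix roots v h0 hc).symm.trans rfl ▸ hc, rfl, hInv,
        fun u _ => rfl⟩
    · have hr0 : 0 ≤ gd roots v.toNat := (hInv v.toNat (by omega)).1
      have hr1 : gd roots v.toNat ≤ (v.toNat : Int) := (hInv v.toNat (by omega)).2
      have hrlt : gd roots v.toNat < v := by omega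
      obtain ⟨hP2, hPlen, hPInv, hPpt⟩ := IHf (gd roots v.toNat) hr0 (by omega) (by omega)
      set P := findA f roots (gd roots v.toNat) with hPdef
      have e : findA (f + 1) roots v =
          (PySem.List.pySetD P.1 v P.2,
           PySem.List.pyGetD (PySem.List.pySetD P.1 v P.2) v 0) := by
        simp only [findA, hv]
        rw [if_pos hc]
      have hset : PySem.List.pySetD P.1 v P.2 = P.1.set v.toNat P.2 :=
        PySem.List.pySetD_of_nonneg P.1 P.2 h0
      have hvP : v.toNat < P.1.length := by rw [hPlen]; omega
      -- P.2 is the root of v in P.1, so the write is exactly a compression step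
      have hrootv : rootN roots v = rootN roots (gd roots v.toNat) := by
        rw [root_step roots hInv v h0 h1, if_neg hc]
      have hP2v : P.2 = rootN P.1 ((v.toNat : Nat) : Int) := by
        rw [hP2, hPpt v.toNat (by omega), show ((v.toNat : Nat) : Int) = v by omega,
          hrootv]
      obtain ⟨hCInv, hCpt⟩ := rootN_compress P.1 hPInv v.toNat hvP
      have hsets : P.1.set v.toNat P.2 = P.1.set v.toNat (rootN P.1 ((v.toNat : Nat) : Int)) := by
        rw [← hP2v]
      have hgd2 : PySem.List.pyGetD (PySem.List.pySetD P.1 v P.2) v 0 = P.2 := by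
        rw [hset, pyGetD_int _ v h0, gd_set_lt _ _ _ _ (by simpa using hvP), if_pos rfl]
      refine ⟨?_, ?_, ?_, ?_⟩
      · rw [e]; show PySem.List.pyGetD _ v 0 = _
        rw [hgd2, hP2, ← hrootv]
      · rw [e]; show (PySem.List.pySetD P.1 v P.2).length = _
        rw [hset, List.length_set, hPlen]
      · rw [e]; show InvR (PySem.List.pySetD P.1 v P.2)
        rw [hset, hsets]; exact hCInv
      · intro u hu
        rw [e]; show rootN (PySem.List.pySetD P.1 v P.2) (u : Int) = _
        rw [hset, hsets, hCpt u (by rw [hPlen]; exact hu), hPpt u hu]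

-- ---- the Kruskal pass: A's state and B's state stay related ----

def predE (N : Int) (e : Int × Int × Int) : Prop :=
  (0 ≤ e.1 ∧ e.1 < N) ∧ (0 ≤ e.2.1 ∧ e.2.1 < N)

def KRel (g0 : List (List (Int × Int))) (n : Nat)
    (stA : List Int × List (Int × Int × Int) × Int)
    (stB : List Int × List (List (Int × Int)) × Int) : Prop :=
  stA.1.length = n ∧ InvR stA.1 ∧ stB.1.length = n ∧
  (∀ i : Nat, i < n → gd stB.1 i = rootN stA.1 (i : Int)) ∧
  stB.2.1 = stA.2.1.foldl gStep g0 ∧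
  stB.2.2 = stA.2.2

lemma step_rel (g0 : List (List (Int × Int))) (n : Nat) (e : Int × Int × Int)
    (stA : List Int × List (Int × Int × Int) × Int)
    (stB : List Int × List (List (Int × Int)) × Int)
    (he : predE (n : Int) e) (hR : KRel g0 n stA stB) :
    KRel g0 n (stepA stA e) (stepB stB e) := by
  obtain ⟨hAlen, hAInv, hBlen, hpt, hadj, hans⟩ := hR
  obtain ⟨⟨ha0, haN⟩, hb0, hbN⟩ := he
  have hna : e.1.toNat < n := by omega
  have hnb : e.2.1.toNat < n := by omega
  have h1a : e.1 < (stA.1.length : Int) := by rw [hAlen]; exact haN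
  obtain ⟨hp1v, hp1len, hp1Inv, hp1pt⟩ :=
    findA_spec stA.1 hAInv (stA.1.length + 1) e.1 ha0 h1a (by omega)
  set P1 := findA (stA.1.length + 1) stA.1 e.1 with hP1def
  have h1b : e.2.1 < (P1.1.length : Int) := by rw [hp1len, hAlen]; exact hbN
  obtain ⟨hp2v, hp2len, hp2Inv, hp2pt⟩ :=
    findA_spec P1.1 hp1Inv (P1.1.length + 1) e.2.1 hb0 h1b (by omega)
  set P2 := findA (P1.1.length + 1) P1.1 e.2.1 with hP2def
  set ra := rootN stA.1 e.1 with hradef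
  set rb := rootN stA.1 e.2.1 with hrbdef
  have hcast : ∀ m : Int, 0 ≤ m → ((m.toNat : Nat) : Int) = m := fun m hm => by omega
  have hpt1 : ∀ u : Nat, u < n → rootN P1.1 (u : Int) = rootN stA.1 (u : Int) :=
    fun u hu => hp1pt u (by omega)
  have hpt2 : ∀ u : Nat, u < n → rootN P2.1 (u : Int) = rootN stA.1 (u : Int) := by
    intro u hu
    rw [hp2pt u (by omega), hpt1 u hu]
  have hp2v' : P2.2 = rb := by
    rw [hp2v, hrbdef, ← hcast e.2.1 hb0, hpt1 e.2.1.toNat hnb]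
  -- the two Python lookups coincide with A's two find_root results
  have hraB : PySem.List.pyGetD stB.1 e.1 0 = ra := by
    rw [pyGetD_int _ _ ha0, hpt e.1.toNat hna, hradef, hcast e.1 ha0]
  have hrbB : PySem.List.pyGetD stB.1 e.2.1 0 = rb := by
    rw [pyGetD_int _ _ hb0, hpt e.2.1.toNat hnb, hrbdef, hcast e.2.1 hb0]
  have hP2len' : P2.1.length = n := by rw [hp2len, hp1len, hAlen]
  by_cases hc : ra = rb
  · have eA : stepA stA e = (P2.1, stA.2.1, stA.2.2) := by
      simp only [stepA, ← hP1def, ← hP2def]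
      rw [if_neg (by rw [hp1v, hp2v']; exact not_ne_iff.mpr hc)]
    have eB : stepB stB e = stB := by
      simp only [stepB]
      rw [if_neg (by rw [hraB, hrbB]; exact not_ne_iff.mpr hc)]
    rw [eA, eB]
    refine ⟨hP2len', hp2Inv, hBlen, ?_, hadj, hans⟩
    intro i hi
    rw [hpt i hi, hpt2 i hi]
  · -- the union branch
    obtain ⟨hra0, hrale, hrafix⟩ := rootN_props stA.1 hAInv e.1 ha0 h1a
    obtain ⟨hrb0, hrble, hrbfix⟩ :=
      rootN_props stA.1 hAInv e.2.1 hb0 (by rw [hAlen]; exact hbN)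
    rw [← hradef] at hra0 hrale hrafix
    rw [← hrbdef] at hrb0 hrble hrbfix
    set lo := if ra < rb then ra else rb with hlodef
    set hi := if ra < rb then rb else ra with hhidef
    have hlo0 : 0 ≤ lo := by rw [hlodef]; split <;> omega
    have hlohi : lo < hi := by
      rw [hlodef, hhidef]
      rcases lt_or_gt_of_ne hc with h | h
      · rw [if_pos h, if_pos h]; exact h
      · rw [if_neg (by omega), if_neg (by omega)]; exact h
    have hhiN : hi < (n : Int) := by
      rw [hhidef]; split <;> [skip; skip] <;> rw [hAlen] at * <;> omega
    -- A's lo/hi coincide with B's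
    have hAlo : (if P1.2 > P2.2 then P2.2 else P1.2) = lo := by
      rw [hp1v, hp2v', hlodef]
      rcases lt_or_gt_of_ne hc with h | h
      · rw [if_neg (by omega), if_pos h]
      · rw [if_pos h, if_neg (by omega)]
    have hAhi : (if P1.2 > P2.2 then P1.2 else P2.2) = hi := by
      rw [hp1v, hp2v', hhidef]
      rcases lt_or_gt_of_ne hc with h | h
      · rw [if_neg (by omega), if_pos h]
      · rw [if_pos h, if_neg (by omega)]
    have eA : stepA stA e =
        (PySem.List.pySetD P2.1 hi lo, stA.2.1 ++ [e], stA.2.2 + e.2.2) := by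
      simp only [stepA, ← hP1def, ← hP2def]
      rw [if_pos (by rw [hp1v, hp2v']; exact hc), hAlo, hAhi]
    have eB : stepB stB e =
        (stB.1.map (fun x => if x = hi then lo else x),
         gStep stB.2.1 e, stB.2.2 + e.2.2) := by
      simp only [stepB, gStep]
      rw [hraB, hrbB, if_pos hc, ← hlodef, ← hhidef]
    -- fixpoint facts needed for the union lemma, transported to P2.1
    have hfixP : ∀ m : Int, 0 ≤ m → m < (n : Int) → rootN stA.1 m = m →
        gd P2.1 m.toNat = m := by
      intro m hm0 hmN hfx
      apply fix_of_rootN P2.1 hp2Inv m hm0 (by rw [hP2len']; exact hmN)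
      rw [← hcast m hm0, hpt2 m.toNat (by omega), hcast m hm0, hfx]
    have hrafix' : rootN stA.1 ra = ra := by
      rw [hradef]; exact rootN_idem stA.1 hAInv e.1 ha0 h1a
    have hrbfix' : rootN stA.1 rb = rb := by
      rw [hrbdef]; exact rootN_idem stA.1 hAInv e.2.1 hb0 (by rw [hAlen]; exact hbN)
    have hfl : gd P2.1 lo.toNat = lo := by
      apply hfixP lo hlo0 (by omega)
      rw [hlodef]; split <;> [exact hrafix'; exact hrbfix']
    have hfh : gd P2.1 hi.toNat = hi := by
      apply hfixP hi (by omega) hhiN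
      rw [hhidef]; split <;> [exact hrbfix'; exact hrafix']
    obtain ⟨hUInv, hUpt⟩ := rootN_union P2.1 hp2Inv lo hi hlo0 hlohi
      (by rw [hP2len']; exact hhiN) hfl hfh
    have hsetD : PySem.List.pySetD P2.1 hi lo = P2.1.set hi.toNat lo :=
      PySem.List.pySetD_of_nonneg P2.1 lo (by omega)
    rw [eA, eB]
    refine ⟨?_, ?_, ?_, ?_, ?_, ?_⟩
    · show (PySem.List.pySetD P2.1 hi lo).length = n
      rw [hsetD, List.length_set, hP2len']
    · show InvR (PySem.List.pySetD P2.1 hi lo)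
      rw [hsetD]; exact hUInv
    · show (stB.1.map _).length = n
      rw [List.length_map, hBlen]
    · intro i hiLt
      show gd (stB.1.map (fun x => if x = hi then lo else x)) i =
        rootN (PySem.List.pySetD P2.1 hi lo) (i : Int)
      rw [gd_map_lt _ _ _ (by rw [hBlen]; exact hiLt), hpt i hiLt, hsetD,
        hUpt i (by rw [hP2len']; exact hiLt), hpt2 i hiLt]
    · show gStep stB.2.1 e = (stA.2.1 ++ [e]).foldl gStep g0
      rw [List.foldl_append, hadj]
      rfl
    · show stB.2.2 + e.2.2 = stA.2.2 + e.2.2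
      rw [hans]
lemma fold_rel (g0 : List (List (Int × Int))) (n : Nat) :
    ∀ (es : List (Int × Int × Int)) stA stB, (∀ e ∈ es, predE (n : Int) e) →
      KRel g0 n stA stB → KRel g0 n (es.foldl stepA stA) (es.foldl stepB stB) := by
  intro es
  induction es with
  | nil => intro stA stB _ hR; exact hR
  | cons e es ih =>
    intro stA stB hes hR
    exact ih _ _ (fun x hx => hes x (List.mem_cons_of_mem _ hx))
      (step_rel g0 n e stA stB (hes e List.mem_cons_self) hR)

-- ---- the diameter pass: B's preorder scan equals A's recursive best ----

def bstep (acc p : Int × Int) : Int × Int := if p.2 > acc.2 then p else acc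

lemma bstep_assoc (a b c : Int × Int) : bstep (bstep a b) c = bstep a (bstep b c) := by
  obtain ⟨a1, a2⟩ := a; obtain ⟨b1, b2⟩ := b; obtain ⟨c1, c2⟩ := c
  unfold bstep
  split_ifs <;> first | rfl | (exfalso; simp_all; omega)

lemma best_cons : ∀ (t : List (Int × Int)) (b h : Int × Int),
    List.foldl bstep b (h :: t) = bstep b (List.foldl bstep h t) := by
  intro t
  induction t with
  | nil => intro b h; rfl
  | cons q t ih =>
    intro b h
    show List.foldl bstep (bstep b h) (q :: t) = _
    rw [ih (bstep b h) q, ih h q, bstep_assoc]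

lemma best_append (b h2 : Int × Int) (l1 t2 : List (Int × Int)) :
    List.foldl bstep b (l1 ++ h2 :: t2) =
      bstep (List.foldl bstep b l1) (List.foldl bstep h2 t2) := by
  rw [List.foldl_append, best_cons]

lemma bestB_cons (h : Int × Int) (t : List (Int × Int)) :
    bestB (h :: t) = List.foldl bstep h t := rfl

-- the step functions of A's dfs fold and B's walk fold, by name
def astep (f : Nat) (g : List (List (Int × Int))) (cur par : Int)
    (acc p : Int × Int) : Int × Int :=
  if p.1 ≠ par then
    let r := dfsA f g p.1 cur
    if p.2 + r.2 > acc.2 then (r.1, p.2 + r.2) else acc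
  else acc

def wstep (f : Nat) (g : List (List (Int × Int))) (cur par d : Int)
    (out : List (Int × Int)) (p : Int × Int) : List (Int × Int) :=
  if p.1 ≠ par then out ++ walkB f g p.1 cur (d + p.2) else out

lemma dfsA_succ (f : Nat) (g : List (List (Int × Int))) (cur par : Int) :
    dfsA (f + 1) g cur par =
      (PySem.List.pyGetD g cur []).foldl (astep f g cur par) (cur, 0) := rfl

lemma walkB_succ (f : Nat) (g : List (List (Int × Int))) (cur par d : Int) :
    walkB (f + 1) g cur par d =
      (PySem.List.pyGetD g cur []).foldl (wstep f g cur par d) [(cur, d)] := rfl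

lemma foldl_wstep_extend (f : Nat) (g : List (List (Int × Int))) (cur par d : Int) :
    ∀ (l : List (Int × Int)) (a : List (Int × Int)),
      ∃ t, List.foldl (wstep f g cur par d) a l = a ++ t := by
  intro l
  induction l with
  | nil => intro a; exact ⟨[], by simp⟩
  | cons p l ih =>
    intro a
    by_cases hp : p.1 ≠ par
    · obtain ⟨t, ht⟩ := ih (a ++ walkB f g p.1 cur (d + p.2))
      refine ⟨walkB f g p.1 cur (d + p.2) ++ t, ?_⟩
      rw [List.foldl_cons, show wstep f g cur par d a p =
        a ++ walkB f g p.1 cur (d + p.2) by simp only [wstep, if_pos hp], ht,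
        List.append_assoc]
    · obtain ⟨t, ht⟩ := ih a
      refine ⟨t, ?_⟩
      rw [List.foldl_cons, show wstep f g cur par d a p = a by
        simp only [wstep, if_neg hp], ht]

lemma walk_prefix (fuel : Nat) (g : List (List (Int × Int))) (cur par d : Int) :
    ∃ t, walkB fuel g cur par d = (cur, d) :: t := by
  match fuel with
  | 0 => exact ⟨[], rfl⟩
  | f + 1 =>
    obtain ⟨t, ht⟩ := foldl_wstep_extend f g cur par d (PySem.List.pyGetD g cur []) [(cur, d)]
    exact ⟨t, by rw [walkB_succ, ht]; rfl⟩

lemma walk_best_aux (g : List (List (Int × Int))) (f : Nat) (cur par d : Int)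
    (hIH : ∀ c p dd, bestB (walkB f g c p dd) = ((dfsA f g c p).1, (dfsA f g c p).2 + dd)) :
    ∀ (l : List (Int × Int)) (accA : Int × Int) (hA : Int × Int) (tA : List (Int × Int)),
      List.foldl bstep hA tA = (accA.1, accA.2 + d) →
      bestB (List.foldl (wstep f g cur par d) (hA :: tA) l) =
        ((List.foldl (astep f g cur par) accA l).1,
         (List.foldl (astep f g cur par) accA l).2 + d) := by
  intro l
  induction l with
  | nil => intro accA hA tA hacc; simpa [bestB_cons] using hacc
  | cons p l ih =>
    intro accA hA tA hacc
    by_cases hp : p.1 ≠ par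
    · obtain ⟨tb, htb⟩ := walk_prefix f g p.1 cur (d + p.2)
      have hw : wstep f g cur par d (hA :: tA) p =
          hA :: (tA ++ (p.1, d + p.2) :: tb) := by
        simp only [wstep, if_pos hp, htb]; rfl
      have hbb : bestB (walkB f g p.1 cur (d + p.2)) =
          List.foldl bstep (p.1, d + p.2) tb := by rw [htb, bestB_cons]
      have hstep : List.foldl bstep hA (tA ++ (p.1, d + p.2) :: tb) =
          ((astep f g cur par accA p).1, (astep f g cur par accA p).2 + d) := by
        rw [best_append, hacc, ← hbb, hIH p.1 cur (d + p.2)]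
        simp only [astep, if_pos hp, bstep]
        by_cases hgt : p.2 + (dfsA f g p.1 cur).2 > accA.2
        · simp only [if_pos hgt]
          rw [if_pos (by simp; omega)]
          simp
          omega
        · simp only [if_neg hgt]
          rw [if_neg (by simp; omega)]
      have : List.foldl (wstep f g cur par d) (hA :: tA) (p :: l) =
          List.foldl (wstep f g cur par d) (hA :: (tA ++ (p.1, d + p.2) :: tb)) l := by
        rw [List.foldl_cons, hw]
      rw [this, List.foldl_cons]
      exact ih (astep f g cur par accA p) hA (tA ++ (p.1, d + p.2) :: tb) hstep
    · have hw : wstep f g cur par d (hA :: tA) p = hA :: tA := by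
        simp only [wstep, if_neg hp]
      have ha : astep f g cur par accA p = accA := by
        simp only [astep, if_neg hp]
      rw [List.foldl_cons, hw, List.foldl_cons, ha]
      exact ih accA hA tA hacc

lemma walk_best (g : List (List (Int × Int))) :
    ∀ (fuel : Nat) (cur par d : Int),
      bestB (walkB fuel g cur par d) =
        ((dfsA fuel g cur par).1, (dfsA fuel g cur par).2 + d) := by
  intro fuel
  induction fuel with
  | zero =>
    intro cur par d
    show bestB [(cur, d)] = ((cur, 0).1, (cur, 0).2 + d)
    simp [bestB]
  | succ f ih =>
    intro cur par d
    rw [walkB_succ, dfsA_succ]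
    exact walk_best_aux g f cur par d ih (PySem.List.pyGetD g cur []) (cur, 0) (cur, d) []
      (by simp)

-- ---- assembly ----

theorem solution_eq (N K : Int) (edges : List (Int × Int × Int))
    (hPre : Pre_solution N K edges) : solution N K edges = solution_alt N K edges := by
  obtain ⟨hN, hE⟩ := hPre
  set n := N.toNat with hn
  have hnN : (n : Int) = N := by omega
  set r0 := PySem.List.pyRange 0 N 1 with hr0
  set g0 := r0.map (fun _ => ([] : List (Int × Int))) with hg0
  set es := PySem.List.sorted edges (fun e => e.2.2) false with hes
  have hlen0 : r0.length = n := by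
    rw [hr0, PySem.List.length_pyRange_one]; omega
  have hgd0 : ∀ i : Nat, i < n → gd r0 i = (i : Int) := by
    intro i hi
    show (r0[i]?).getD 0 = (i : Int)
    rw [hr0, PySem.List.getElem?_pyRange_one, if_pos (by omega)]
    simp
  have hInv0 : InvR r0 := by
    intro i hi
    rw [hgd0 i (by omega)]
    exact ⟨Int.natCast_nonneg i, le_refl _⟩
  have hpt0 : ∀ i : Nat, i < n → gd r0 i = rootN r0 (i : Int) := by
    intro i hi
    rw [hgd0 i hi, rootN_of_fix r0 (i : Int) (Int.natCast_nonneg i)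
      (by rw [Int.toNat_natCast, hgd0 i hi])]
  have hRel0 : KRel g0 n (r0, [], 0) (r0, g0, 0) :=
    ⟨hlen0, hInv0, hlen0, fun i hi => hpt0 i hi, by simp, rfl⟩
  have hEs : ∀ e ∈ es, predE (n : Int) e := by
    intro e he'
    have hm : e ∈ edges := (PySem.List.mem_sorted _ _ _ _).mp he'
    obtain ⟨⟨x1, x2⟩, y1, y2⟩ := hE e hm
    exact ⟨⟨x1, by omega⟩, y1, by omega⟩
  obtain ⟨_, _, _, _, hgEq, hansEq⟩ :=
    fold_rel g0 n es (r0, [], 0) (r0, g0, 0) hEs hRel0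
  simp only [solution, solution_alt, ← hes, ← hr0, ← hg0]
  set SA := es.foldl stepA (r0, [], 0) with hSA
  set SB := es.foldl stepB (r0, g0, 0) with hSB
  set G := SA.2.1.foldl gStep g0 with hG
  have hgEq' : SB.2.1 = G := hgEq
  rw [hansEq, hgEq']
  have hx1 : (bestB (walkB (G.length + 1) G 0 (-1) 0)).1 =
      (dfsA (G.length + 1) G 0 (-1)).1 := by
    rw [walk_best G (G.length + 1) 0 (-1) 0]
  rw [hx1]
  have hy2 : (bestB (walkB (G.length + 1) G ((dfsA (G.length + 1) G 0 (-1)).1) (-1) 0)).2 =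
      (dfsA (G.length + 1) G ((dfsA (G.length + 1) G 0 (-1)).1) (-1)).2 := by
    rw [walk_best G (G.length + 1) ((dfsA (G.length + 1) G 0 (-1)).1) (-1) 0]
    simp
  rw [hy2]

-- ===== VERDICT (by name: the statement is the Claim_ definition above) =====
theorem solution_spec : Claim_equal_solution := by
  intro N K edges _ hPre
  exact solution_eq N K edges hPre
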